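-- pv_equiv track=rewrite | github.com/ZachNobles/FOCS-scripts | universal_language.py | UL_helper
-- ===== SOURCE A (Python) =====
-- def UL_helper(L, U, max_length):
--     new_elements = []
--     for substring in U: # for every current string that has been created
--         for symbol in L: # add every symbol from the language
--             new_string = substring + symbol
--             if len(new_string) <= max_length and new_string not in U:
--                 new_elements.append(new_string)
--
--     # If new_elements is not empty, extend U and recur
--     if new_elements:
--         U.extend(new_elements)
--         return UL_helper(L, U, max_length)
--
--     return U
-- ===== SOURCE B (Python) =====
-- # B: iterative breadth-first closure. Membership is a seen-set and only the strings
-- # created in the previous round (the frontier, built by one comprehension) are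
-- # extended, instead of A's recursion that rescans all of U with list membership.
-- # Like A, this mutates U in place (extends it) and returns it.
-- def UL_helper(L, U, max_length):
--     seen = set(U)
--     frontier = U
--     while frontier:
--         frontier = [s + sym for s in frontier for sym in L
--                     if len(s + sym) <= max_length and (s + sym) not in seen]
--         seen.update(frontier)
--         U.extend(frontier)
--     return U
-- ===== Notes on version B (the rewrite author's own statement) =====
-- stated objective: alternative
-- what changed: Replaces A's recursion that rescans the whole of U every round with list membership tests by an iterative closure: a seen-set for membership and one comprehension per round that extends only the previous round's new strings.
import Mathlib
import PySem

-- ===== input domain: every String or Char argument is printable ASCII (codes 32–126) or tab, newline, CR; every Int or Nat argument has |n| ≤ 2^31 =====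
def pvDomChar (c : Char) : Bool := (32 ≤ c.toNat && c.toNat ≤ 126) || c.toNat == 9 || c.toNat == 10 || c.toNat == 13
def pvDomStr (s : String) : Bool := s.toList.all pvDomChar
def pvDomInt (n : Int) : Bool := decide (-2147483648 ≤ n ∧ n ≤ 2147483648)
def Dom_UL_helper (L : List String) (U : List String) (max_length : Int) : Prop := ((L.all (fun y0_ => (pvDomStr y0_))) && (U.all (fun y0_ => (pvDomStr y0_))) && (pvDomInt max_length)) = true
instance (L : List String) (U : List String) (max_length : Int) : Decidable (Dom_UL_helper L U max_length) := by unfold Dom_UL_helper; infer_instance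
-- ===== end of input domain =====

-- B replaces A's recursion that rescans all of U with list membership by an iterative
-- closure: a seen-set and one comprehension per round over only the previous round's new
-- strings; equivalence is about the return value (both Pythons also mutate U in place
-- identically, by extending it with the same elements).

-- ===== PORT A =====
-- Both Pythons iterate over rounds; each round's new strings are strictly longer than
-- their sources and bounded by max_length, so max_length.toNat + 2 rounds always suffice;
-- the fuel parameter is this bound and is never exhausted on the stated domain.
def UL_helper_go (fuel : Nat) (L : List String) (U : List String) (max_length : Int) : List String :=
  match fuel with
  | 0 => U
  | fuel + 1 =>
    let new_elements := U.foldl (fun acc substring =>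
      L.foldl (fun acc symbol =>
        let new_string := substring ++ symbol
        if PySem.Str.len new_string ≤ max_length ∧ new_string ∉ U then acc ++ [new_string] else acc)
        acc) []
    if new_elements ≠ [] then UL_helper_go fuel L (U ++ new_elements) max_length
    else U

def UL_helper (L : List String) (U : List String) (max_length : Int) : List String :=
  UL_helper_go (max_length.toNat + 2) L U max_length

-- ===== PORT B =====
-- the round comprehension: [s + sym for s in frontier for sym in L if …]
def UL_round (L : List String) (max_length : Int) (seen : PySem.Set String)
    (frontier : List String) : List String :=
  frontier.flatMap (fun s =>
    (L.filter (fun sym => decide (PySem.Str.len (s ++ sym) ≤ max_length ∧ (s ++ sym) ∉ seen))).map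
      (fun sym => s ++ sym))

def UL_helper_alt_go (fuel : Nat) (L : List String) (max_length : Int)
    (seen : PySem.Set String) (frontier U : List String) : List String :=
  match fuel with
  | 0 => U
  | fuel + 1 =>
    match frontier with
    | [] => U
    | _ =>
      let next := UL_round L max_length seen frontier
      UL_helper_alt_go fuel L max_length (PySem.Set.update seen next) next (U ++ next)

def UL_helper_alt (L : List String) (U : List String) (max_length : Int) : List String :=
  UL_helper_alt_go (max_length.toNat + 2) L max_length (PySem.Set.ofList U) U U

-- ===== PRECONDITION & SPEC =====
def Spec_UL_helper (L : List String) (U : List String) (max_length : Int) (out : List String) : Prop := out = UL_helper_alt L U max_length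
instance (L : List String) (U : List String) (max_length : Int) (out : List String) : Decidable (Spec_UL_helper L U max_length out) := by unfold Spec_UL_helper; infer_instance

-- ===== CLAIM (what is proved, stated in full; the proofs are below) =====
def Claim_equal_UL_helper : Prop := ∀ (L : List String) (U : List String) (max_length : Int), Dom_UL_helper L U max_length → Spec_UL_helper L U max_length (UL_helper L U max_length)

-- ===== LEMMAS AND PROOFS =====

lemma pvInner (L : List String) (max_length : Int) (V : List String) (s : String)
    (acc : List String) :
    L.foldl (fun acc sym =>
      let t := s ++ sym
      if PySem.Str.len t ≤ max_length ∧ t ∉ V then acc ++ [t] else acc) acc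
      = acc ++ (L.filter (fun sym =>
          decide (PySem.Str.len (s ++ sym) ≤ max_length ∧ (s ++ sym) ∉ V))).map
            (fun sym => s ++ sym) := by
  induction L generalizing acc with
  | nil => simp
  | cons hd tl ih =>
    simp only [List.foldl_cons, List.filter_cons]
    by_cases h : PySem.Str.len (s ++ hd) ≤ max_length ∧ (s ++ hd) ∉ V
    · rw [if_pos h, if_pos (decide_eq_true h), ih, List.map_cons, List.append_assoc,
        List.singleton_append]
    · rw [if_neg h, if_neg (by simpa using h), ih]

-- A's double foldl pass equals the round comprehension (with list V as the "seen")
lemma pvPass_eq (L : List String) (max_length : Int) (V W : List String) (acc : List String) :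
    W.foldl (fun acc s =>
      L.foldl (fun acc sym =>
        let t := s ++ sym
        if PySem.Str.len t ≤ max_length ∧ t ∉ V then acc ++ [t] else acc)
        acc) acc = acc ++ UL_round L max_length V W := by
  induction W generalizing acc with
  | nil => simp [UL_round]
  | cons hd tl ih =>
    simp only [List.foldl_cons]
    rw [pvInner, ih]
    simp [UL_round]

lemma pvRound_congr (L : List String) (max_length : Int) (V V' : List String)
    (W : List String) (h : ∀ x : String, x ∈ V ↔ x ∈ V') :
    UL_round L max_length V W = UL_round L max_length V' W := by
  unfold UL_round
  congr 1; funext s; congr 1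
  apply List.filter_congr
  intro sym _
  simp [h]

lemma pvRound_append (L : List String) (max_length : Int) (V : List String)
    (W1 W2 : List String) :
    UL_round L max_length V (W1 ++ W2) = UL_round L max_length V W1 ++ UL_round L max_length V W2 := by
  unfold UL_round
  exact List.flatMap_append ..

lemma pvRound_eq_nil (L : List String) (max_length : Int) (V W : List String)
    (h : ∀ s ∈ W, ∀ sym ∈ L, PySem.Str.len (s ++ sym) ≤ max_length → (s ++ sym) ∈ V) :
    UL_round L max_length V W = [] := by
  unfold UL_round
  rw [List.flatMap_eq_nil_iff]
  intro s hs
  rw [List.map_eq_nil_iff, List.filter_eq_nil_iff]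
  intro sym hsym
  simp only [decide_eq_true_eq, not_and, not_not]
  exact fun hlen => h s hs sym hsym hlen

lemma pvMem_round (L : List String) (max_length : Int) (V W : List String)
    {s sym : String} (hs : s ∈ W) (hsym : sym ∈ L)
    (hlen : PySem.Str.len (s ++ sym) ≤ max_length) (hnv : (s ++ sym) ∉ V) :
    (s ++ sym) ∈ UL_round L max_length V W := by
  unfold UL_round
  rw [List.mem_flatMap]
  refine ⟨s, hs, List.mem_map.2 ⟨sym, List.mem_filter.2 ⟨hsym, ?_⟩, rfl⟩⟩
  simp only [decide_eq_true_eq]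
  exact ⟨hlen, hnv⟩

lemma pvMem_update (seen : PySem.Set String) (xs : List String) (x : String) :
    x ∈ PySem.Set.update seen xs ↔ x ∈ seen ∨ x ∈ xs := by
  induction xs generalizing seen with
  | nil => simp [PySem.Set.update]
  | cons hd tl ih =>
    simp only [PySem.Set.update, List.foldl_cons] at *
    rw [ih]
    simp [PySem.Set.mem_add, or_assoc]

lemma pvGoA_succ (fuel : Nat) (L : List String) (U : List String) (max_length : Int) :
    UL_helper_go (fuel + 1) L U max_length
      = if UL_round L max_length U U ≠ [] then
          UL_helper_go fuel L (U ++ UL_round L max_length U U) max_length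
        else U := by
  simp only [UL_helper_go]
  rw [pvPass_eq]
  simp

lemma pvAltB_succ (fuel : Nat) (L : List String) (max_length : Int)
    (seen : PySem.Set String) (frontier U : List String) :
    UL_helper_alt_go (fuel + 1) L max_length seen frontier U
      = if frontier = [] then U
        else UL_helper_alt_go fuel L max_length
          (PySem.Set.update seen (UL_round L max_length seen frontier))
          (UL_round L max_length seen frontier) (U ++ UL_round L max_length seen frontier) := by
  cases frontier <;> simp [UL_helper_alt_go]

lemma pvAlt_go_nil (fuel : Nat) (L : List String) (max_length : Int)
    (seen : PySem.Set String) (U : List String) :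
    UL_helper_alt_go fuel L max_length seen [] U = U := by
  cases fuel <;> simp [UL_helper_alt_go]

lemma pvGo_eq_alt (L : List String) (max_length : Int) :
    ∀ (fuel : Nat) (pre frontier : List String) (seen : PySem.Set String),
      (∀ s ∈ pre, ∀ sym ∈ L, PySem.Str.len (s ++ sym) ≤ max_length → (s ++ sym) ∈ pre ++ frontier) →
      (∀ x, x ∈ seen ↔ x ∈ pre ++ frontier) →
      UL_helper_go fuel L (pre ++ frontier) max_length
        = UL_helper_alt_go fuel L max_length seen frontier (pre ++ frontier) := by
  intro fuel
  induction fuel with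
  | zero => intro pre frontier seen _ _; rfl
  | succ fuel ih =>
    intro pre frontier seen hpre hseen
    rw [pvGoA_succ, pvAltB_succ]
    have hBgen : UL_round L max_length seen frontier
        = UL_round L max_length (pre ++ frontier) frontier := pvRound_congr _ _ _ _ _ hseen
    have hsplit : UL_round L max_length (pre ++ frontier) (pre ++ frontier)
        = UL_round L max_length (pre ++ frontier) frontier := by
      rw [pvRound_append, pvRound_eq_nil L max_length (pre ++ frontier) pre hpre, List.nil_append]
    rw [hBgen, hsplit]
    set new := UL_round L max_length (pre ++ frontier) frontier with hnew
    by_cases hf : frontier = []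
    · subst hf
      have : new = [] := by simp [hnew, UL_round]
      simp [this]
    · rw [if_neg hf]
      by_cases hn : new = []
      · rw [if_neg (by simp [hn]), hn, List.append_nil, pvAlt_go_nil]
      · rw [if_pos (by simp [hn])]
        have hpre' : ∀ s ∈ pre ++ frontier, ∀ sym ∈ L,
            PySem.Str.len (s ++ sym) ≤ max_length → (s ++ sym) ∈ (pre ++ frontier) ++ new := by
          intro s hsmem sym hsym hlen
          rcases List.mem_append.1 hsmem with hsp | hsf
          · exact List.mem_append.2 (Or.inl (hpre s hsp sym hsym hlen))
          · by_cases hv : (s ++ sym) ∈ pre ++ frontier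
            · exact List.mem_append.2 (Or.inl hv)
            · exact List.mem_append.2 (Or.inr (hnew ▸ pvMem_round L max_length _ _ hsf hsym hlen hv))
        have hseen' : ∀ x, x ∈ PySem.Set.update seen new ↔ x ∈ (pre ++ frontier) ++ new := by
          intro x
          rw [pvMem_update, hseen x]
          simp [or_assoc]
        have := ih (pre ++ frontier) new (PySem.Set.update seen new) hpre' hseen'
        rw [← this]

-- ===== VERDICT (by name: the statement is the Claim_ definition above) =====
theorem UL_helper_spec : Claim_equal_UL_helper := by
  intro L U max_length _
  unfold Spec_UL_helper UL_helper UL_helper_alt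
  have h := pvGo_eq_alt L max_length (max_length.toNat + 2) [] U (PySem.Set.ofList U)
    (by intro s hs; simp at hs) (by intro x; simp [PySem.Set.mem_ofList])
  simpa using h
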